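-- pv_equiv track=rewrite | github.com/mlempp/voice_of_the_community | functions/_helper_functions.py | add_breaks_before_space
-- ===== SOURCE A (Python) =====
-- def add_breaks_before_space(string):
--     updated_string = ''
--     cnt = 0
--     for letter in string:
--         cnt += 1
--         if (letter == ' ' ) & (cnt > 120):
--             updated_string = updated_string+'<br>'
--             cnt = 0
--         else:
--             updated_string = updated_string + letter
--
--     return updated_string
-- ===== SOURCE B (Python) =====
-- def add_breaks_before_space(string):
--     # Jump from space to space with str.find instead of scanning char by char.
--     out = []
--     rest = string
--     while True:
--         idx = rest.find(' ', 120)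
--         if idx == -1:
--             out.append(rest)
--             return ''.join(out)
--         out.append(rest[:idx])
--         out.append('<br>')
--         rest = rest[idx + 1:]
-- ===== Notes on version B (the rewrite author's own statement) =====
-- stated objective: faster
-- what changed: B replaces A's per-character scan with a running counter and quadratic string concatenation by chunk processing: str.find jumps directly to the next space at offset 120 or later, slicing the string between breaks and joining the pieces once.
import Mathlib
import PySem

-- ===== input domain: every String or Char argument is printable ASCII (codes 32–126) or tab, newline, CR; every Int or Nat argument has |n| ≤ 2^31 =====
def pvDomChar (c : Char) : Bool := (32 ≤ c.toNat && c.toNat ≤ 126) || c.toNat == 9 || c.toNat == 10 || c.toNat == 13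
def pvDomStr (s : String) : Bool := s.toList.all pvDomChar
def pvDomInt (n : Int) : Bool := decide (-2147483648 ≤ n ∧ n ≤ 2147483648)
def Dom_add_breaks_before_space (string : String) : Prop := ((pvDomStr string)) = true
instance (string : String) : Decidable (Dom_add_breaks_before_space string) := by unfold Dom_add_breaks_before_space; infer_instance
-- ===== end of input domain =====

-- B skips by str.find(' ', 120) from suffix to suffix instead of counting every character (objective: idiomatic).

-- ===== PORT A =====
-- A's loop: cnt increments per char; a space with cnt > 120 becomes '<br>' and resets cnt.
def pvALoop : List Char → List Char → Int → List Char
  | [], acc, _ => acc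
  | ch :: rest, acc, cnt =>
    let cnt' := cnt + 1
    if ch = ' ' ∧ cnt' > 120 then pvALoop rest (acc ++ "<br>".toList) 0
    else pvALoop rest (acc ++ [ch]) cnt'

def add_breaks_before_space (string : String) : String :=
  String.mk (pvALoop string.toList [] 0)

-- ===== PORT B =====
-- rest.find(' ', k): index of the first ' ' at position ≥ k, none if absent (exact for Nat start ≤ len handling: if k ≥ len, none, as in Python).
def pvFindSp : List Char → Nat → Option Nat
  | [], _ => none
  | c :: rest, 0 => if c = ' ' then some 0 else (pvFindSp rest 0).map (· + 1)
  | _ :: rest, k + 1 => (pvFindSp rest k).map (· + 1)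

theorem pvFindSp_lt (l : List Char) (k i : Nat) (h : pvFindSp l k = some i) : i < l.length := by
  induction l generalizing k i with
  | nil => simp [pvFindSp] at h
  | cons c rest ih =>
    cases k with
    | zero =>
      by_cases hc : c = ' '
      · simp [pvFindSp, hc] at h; simp; omega
      · simp [pvFindSp, hc] at h
        obtain ⟨j, hj, rfl⟩ := h
        have := ih 0 j hj; simp; omega
    | succ k =>
      simp [pvFindSp] at h
      obtain ⟨j, hj, rfl⟩ := h
      have := ih k j hj; simp; omega

-- B's loop: out accumulates slices and '<br>' tags; rest is the remaining suffix.
def pvBLoop (l : List Char) (acc : List Char) : List Char :=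
  match h : pvFindSp l 120 with
  | none => acc ++ l
  | some i => pvBLoop (l.drop (i + 1)) (acc ++ l.take i ++ "<br>".toList)
termination_by l.length
decreasing_by
  have := pvFindSp_lt l 120 i h
  simp only [List.length_drop]
  omega

def add_breaks_before_space_alt (string : String) : String :=
  String.mk (pvBLoop string.toList [])

-- ===== PRECONDITION & SPEC =====
def Spec_add_breaks_before_space (string : String) (out : String) : Prop := out = add_breaks_before_space_alt string
instance (string : String) (out : String) : Decidable (Spec_add_breaks_before_space string out) := by unfold Spec_add_breaks_before_space; infer_instance

-- ===== CLAIM (what is proved, stated in full; the proofs are below) =====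
def Claim_equal_add_breaks_before_space : Prop := ∀ (string : String), Dom_add_breaks_before_space string → Spec_add_breaks_before_space string (add_breaks_before_space string)

-- ===== LEMMAS AND PROOFS =====

-- chunk l k: the common intermediate form — first break at the first space at position ≥ k, then threshold resets to 120.
def pvChunk : List Char → Nat → List Char
  | l, k =>
    match h : pvFindSp l k with
    | none => l
    | some i => l.take i ++ "<br>".toList ++ pvChunk (l.drop (i + 1)) 120
termination_by l _ => l.length
decreasing_by
  have := pvFindSp_lt l k i h
  simp only [List.length_drop]
  omega

theorem pvChunk_none (l : List Char) (k : Nat) (hf : pvFindSp l k = none) :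
    pvChunk l k = l := by
  rw [pvChunk]; split <;> simp_all

theorem pvChunk_some (l : List Char) (k i : Nat) (hf : pvFindSp l k = some i) :
    pvChunk l k = l.take i ++ "<br>".toList ++ pvChunk (l.drop (i + 1)) 120 := by
  rw [pvChunk]; split <;> simp_all

theorem pvBLoop_none (l acc : List Char) (hf : pvFindSp l 120 = none) :
    pvBLoop l acc = acc ++ l := by
  rw [pvBLoop]; split <;> simp_all

theorem pvBLoop_some (l acc : List Char) (i : Nat) (hf : pvFindSp l 120 = some i) :
    pvBLoop l acc = pvBLoop (l.drop (i + 1)) (acc ++ l.take i ++ "<br>".toList) := by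
  rw [pvBLoop]; split <;> simp_all

theorem pvALoop_acc (l : List Char) (acc : List Char) (c : Int) :
    pvALoop l acc c = acc ++ pvALoop l [] c := by
  induction l generalizing acc c with
  | nil => simp [pvALoop]
  | cons ch rest ih =>
    simp only [pvALoop]
    simp only [List.nil_append]
    split_ifs with h
    · rw [ih (acc ++ "<br>".toList) 0, ih ("<br>".toList) 0]; simp
    · rw [ih (acc ++ [ch]) (c + 1), ih [ch] (c + 1)]; simp

theorem pvChunk_cons (ch : Char) (rest : List Char) (k : Nat)
    (h : k = 0 → ch ≠ ' ') :
    pvChunk (ch :: rest) k = ch :: pvChunk rest (k - 1) := by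
  have hhead : pvFindSp (ch :: rest) k = (pvFindSp rest (k - 1)).map (· + 1) := by
    cases k with
    | zero => simp [pvFindSp, h rfl]
    | succ k => simp [pvFindSp]
  cases hf : pvFindSp rest (k - 1) with
  | none =>
    rw [pvChunk_none _ _ (by simp [hhead, hf]), pvChunk_none _ _ hf]
  | some i =>
    rw [pvChunk_some (ch :: rest) k (i + 1) (by simp [hhead, hf]), pvChunk_some rest (k - 1) i hf]
    simp

theorem pvALoop_eq_chunk (l : List Char) (c : Int) (hc : 0 ≤ c) :
    pvALoop l [] c = pvChunk l (120 - c).toNat := by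
  induction l generalizing c with
  | nil => rw [pvChunk_none _ _ (by simp [pvFindSp])]; simp [pvALoop]
  | cons ch rest ih =>
    simp only [pvALoop]
    split_ifs with h
    · obtain ⟨hch, hgt⟩ := h
      subst hch
      have hk : ((120 : Int) - c).toNat = 0 := by omega
      rw [pvALoop_acc, ih 0 le_rfl, hk,
        pvChunk_some (' ' :: rest) 0 0 (by simp [pvFindSp])]
      simp
    · have hne : ((120 : Int) - c).toNat = 0 → ch ≠ ' ' := by
        intro hk hch
        exact h ⟨hch, by omega⟩
      rw [pvALoop_acc, ih (c + 1) (by omega), pvChunk_cons ch rest _ hne]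
      have hsub : ((120 : Int) - (c + 1)).toNat = ((120 : Int) - c).toNat - 1 := by omega
      simp [hsub]

theorem pvBLoop_eq_chunk (l : List Char) (acc : List Char) :
    pvBLoop l acc = acc ++ pvChunk l 120 := by
  induction hl : l.length using Nat.strong_induction_on generalizing l acc with
  | _ n ih =>
    cases hf : pvFindSp l 120 with
    | none => rw [pvBLoop_none _ _ hf, pvChunk_none _ _ hf]
    | some i =>
      have hi := pvFindSp_lt l 120 i hf
      rw [pvBLoop_some _ _ _ hf, pvChunk_some _ _ _ hf,
        ih ((l.drop (i + 1)).length) (by simp only [List.length_drop]; omega) _ _ rfl]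
      simp

-- ===== VERDICT (by name: the statement is the Claim_ definition above) =====
theorem add_breaks_before_space_spec : Claim_equal_add_breaks_before_space := by
  intro s _
  unfold Spec_add_breaks_before_space add_breaks_before_space add_breaks_before_space_alt
  rw [pvALoop_eq_chunk _ 0 le_rfl, pvBLoop_eq_chunk]
  simp
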